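-- pv_equiv track=rewrite | github.com/matml/A-unified-stochastic-modelling-framework-for-the-spread-of-nosocomial-infections | Figure6_Right.py | Pos_R0
-- ===== SOURCE A (Python) =====
-- def Pos_R0(a,Ns,M,k):
-- 	position=0
-- 	for i in range(1,M+1):
-- 		prod=1
-- 		for h in range(i+1,M+1):
-- 			if h!=k:
-- 				prod=prod*(Ns[h-1]+1)
-- 			else:
-- 				prod=prod*Ns[h-1]
-- 		if i!=k:
-- 			position+=a[i-1]*prod
-- 		if i==k:
-- 			position+=(a[i-1]-1)*prod
-- 	return int(position)
-- ===== SOURCE B (Python) =====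
-- def Pos_R0(a, Ns, M, k):
--     # single backward pass maintaining the suffix product of the radices;
--     # Ns is only read at indices 1..M-1, exactly the ones A reads
--     position = 0
--     prod = 1
--     for i in range(M, 1, -1):
--         position += (a[i-1] if i != k else a[i-1] - 1) * prod
--         prod *= (Ns[i-1] + 1) if i != k else Ns[i-1]
--     if M >= 1:
--         position += (a[0] if 1 != k else a[0] - 1) * prod
--     return int(position)
-- ===== Notes on version B (the rewrite author's own statement) =====
-- stated objective: faster
-- what changed: A recomputes each suffix product with a nested inner loop (O(M^2) multiplications); B makes a single backward pass over i = M..2 maintaining the running suffix product and then adds the i = 1 term, so the inner loop disappears.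
import Mathlib
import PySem

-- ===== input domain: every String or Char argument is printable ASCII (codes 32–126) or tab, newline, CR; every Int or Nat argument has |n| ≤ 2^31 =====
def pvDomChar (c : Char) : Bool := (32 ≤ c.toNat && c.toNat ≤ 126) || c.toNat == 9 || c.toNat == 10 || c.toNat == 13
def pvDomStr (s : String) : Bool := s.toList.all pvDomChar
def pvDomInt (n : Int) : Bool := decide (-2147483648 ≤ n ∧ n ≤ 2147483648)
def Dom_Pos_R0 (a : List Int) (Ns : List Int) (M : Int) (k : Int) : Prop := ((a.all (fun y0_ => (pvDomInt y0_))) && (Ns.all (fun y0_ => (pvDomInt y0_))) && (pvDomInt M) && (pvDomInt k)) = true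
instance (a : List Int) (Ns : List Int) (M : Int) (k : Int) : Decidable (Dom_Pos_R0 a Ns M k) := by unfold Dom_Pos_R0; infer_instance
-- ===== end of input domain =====

-- B replaces A's quadratic loop-in-loop (recomputing each suffix product from scratch)
-- by a single backward pass maintaining the suffix product incrementally.

-- ===== PORT A =====
def Pos_R0 (a : List Int) (Ns : List Int) (M : Int) (k : Int) : Int :=
  (PySem.List.pyRange 1 (M+1) 1).foldl (fun position i =>
    let prod := (PySem.List.pyRange (i+1) (M+1) 1).foldl (fun prod h =>
        if h ≠ k then prod * (PySem.List.pyGetD Ns (h-1) 0 + 1)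
        else prod * PySem.List.pyGetD Ns (h-1) 0) 1
    let position := if i ≠ k then position + PySem.List.pyGetD a (i-1) 0 * prod else position
    if i = k then position + (PySem.List.pyGetD a (i-1) 0 - 1) * prod else position) 0

-- ===== PORT B =====
def Pos_R0_alt (a : List Int) (Ns : List Int) (M : Int) (k : Int) : Int :=
  let s := (PySem.List.pyRange M 1 (-1)).foldl (fun (s : Int × Int) i =>
      (s.1 + (if i ≠ k then PySem.List.pyGetD a (i-1) 0 else PySem.List.pyGetD a (i-1) 0 - 1) * s.2,
       s.2 * (if i ≠ k then PySem.List.pyGetD Ns (i-1) 0 + 1 else PySem.List.pyGetD Ns (i-1) 0)))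
    ((0 : Int), (1 : Int))
  if 1 ≤ M then
    s.1 + (if (1 : Int) ≠ k then PySem.List.pyGetD a 0 0 else PySem.List.pyGetD a 0 0 - 1) * s.2
  else s.1

-- ===== PRECONDITION & SPEC =====
-- Pre_ excludes exactly the inputs on which A raises IndexError: A reads a[i-1] for
-- i = 1..M and Ns[h-1] for h = 2..M, so it raises iff (M ≥ 1 and len(a) < M) or
-- (M ≥ 2 and len(Ns) < M).
def Pre_Pos_R0 (a : List Int) (Ns : List Int) (M : Int) (k : Int) : Prop :=
  (1 ≤ M → M ≤ (a.length : Int)) ∧ (2 ≤ M → M ≤ (Ns.length : Int))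
instance (a : List Int) (Ns : List Int) (M : Int) (k : Int) : Decidable (Pre_Pos_R0 a Ns M k) := by unfold Pre_Pos_R0; infer_instance
def pvWitness_Pos_R0 : List Int × List Int × Int × Int := ([1, 2], [3, 4], 2, 1)

def Spec_Pos_R0 (a : List Int) (Ns : List Int) (M : Int) (k : Int) (out : Int) : Prop := out = Pos_R0_alt a Ns M k
instance (a : List Int) (Ns : List Int) (M : Int) (k : Int) (out : Int) : Decidable (Spec_Pos_R0 a Ns M k out) := by unfold Spec_Pos_R0; infer_instance

-- ===== CLAIM (what is proved, stated in full; the proofs are below) =====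
def Claim_equal_Pos_R0 : Prop := ∀ (a : List Int) (Ns : List Int) (M : Int) (k : Int), Dom_Pos_R0 a Ns M k → Pre_Pos_R0 a Ns M k → Spec_Pos_R0 a Ns M k (Pos_R0 a Ns M k)

-- ===== LEMMAS AND PROOFS =====

-- coefficient a[i-1] (minus 1 at i = k) and radix factor Ns[h-1]+1 (Ns[h-1] at h = k)
def pvC (a : List Int) (k : Int) (i : Int) : Int :=
  if i = k then PySem.List.pyGetD a (i-1) 0 - 1 else PySem.List.pyGetD a (i-1) 0
def pvF (Ns : List Int) (k : Int) (h : Int) : Int :=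
  if h = k then PySem.List.pyGetD Ns (h-1) 0 else PySem.List.pyGetD Ns (h-1) 0 + 1

-- reference value: Σ_{i ∈ l} c i · Π_{h after i in l} f h
def pvSum (c f : Int → Int) : List Int → Int
  | [] => 0
  | i :: t => c i * (t.map f).prod + pvSum c f t

theorem pv_foldl_mul (f : Int → Int) : ∀ (l : List Int) (x : Int),
    l.foldl (fun p h => p * f h) x = x * (l.map f).prod
  | [], x => by simp
  | i :: t, x => by
    simp only [List.foldl_cons, List.map_cons, List.prod_cons, pv_foldl_mul f t]
    ring

theorem pv_A_outer (a Ns : List Int) (M k : Int) : ∀ (n : Nat) (lo pos : Int), lo + n = M + 1 →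
    (PySem.List.pyRange lo (M+1) 1).foldl (fun position i =>
      let prod := (PySem.List.pyRange (i+1) (M+1) 1).foldl (fun prod h =>
          if h ≠ k then prod * (PySem.List.pyGetD Ns (h-1) 0 + 1)
          else prod * PySem.List.pyGetD Ns (h-1) 0) 1
      let position := if i ≠ k then position + PySem.List.pyGetD a (i-1) 0 * prod else position
      if i = k then position + (PySem.List.pyGetD a (i-1) 0 - 1) * prod else position) pos
    = pos + pvSum (pvC a k) (pvF Ns k) (PySem.List.pyRange lo (M+1) 1) := by
  intro n
  induction n with
  | zero =>
    intro lo pos h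
    rw [PySem.List.pyRange_one_eq_nil (by omega)]
    simp [pvSum]
  | succ m ih =>
    intro lo pos h
    rw [PySem.List.pyRange_one_cons (by omega : lo < M + 1)]
    simp only [List.foldl_cons, pvSum]
    rw [ih (lo + 1) _ (by omega)]
    have hinner : (PySem.List.pyRange (lo+1) (M+1) 1).foldl (fun prod h =>
        if h ≠ k then prod * (PySem.List.pyGetD Ns (h-1) 0 + 1)
        else prod * PySem.List.pyGetD Ns (h-1) 0) 1
        = ((PySem.List.pyRange (lo+1) (M+1) 1).map (pvF Ns k)).prod := by
      have : (fun (prod h : Int) =>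
          if h ≠ k then prod * (PySem.List.pyGetD Ns (h-1) 0 + 1)
          else prod * PySem.List.pyGetD Ns (h-1) 0)
          = fun (prod h : Int) => prod * pvF Ns k h := by
        funext p h
        by_cases hk : h = k <;> simp [pvF, hk]
      rw [this, pv_foldl_mul]
      ring
    rw [hinner]
    by_cases hk : lo = k <;> simp [pvC, hk] <;> ring

theorem pv_B_foldr (c f : Int → Int) : ∀ (l : List Int),
    l.foldr (fun i (s : Int × Int) => (s.1 + c i * s.2, s.2 * f i)) ((0 : Int), (1 : Int))
    = (pvSum c f l, (l.map f).prod)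
  | [] => by simp [pvSum]
  | i :: t => by
    simp only [List.foldr_cons, pv_B_foldr c f t, pvSum, List.map_cons, List.prod_cons]
    rw [Prod.mk.injEq]
    exact ⟨by ring, by ring⟩

theorem pv_B_eq (a Ns : List Int) (M k : Int) :
    Pos_R0_alt a Ns M k = pvSum (pvC a k) (pvF Ns k) (PySem.List.pyRange 1 (M+1) 1) := by
  unfold Pos_R0_alt
  rw [PySem.List.pyRange_neg_one_eq_reverse, List.foldl_reverse]
  have hfun : (fun (i : Int) (s : Int × Int) =>
      (s.1 + (if i ≠ k then PySem.List.pyGetD a (i-1) 0 else PySem.List.pyGetD a (i-1) 0 - 1) * s.2,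
       s.2 * (if i ≠ k then PySem.List.pyGetD Ns (i-1) 0 + 1 else PySem.List.pyGetD Ns (i-1) 0)))
      = fun (i : Int) (s : Int × Int) => (s.1 + pvC a k i * s.2, s.2 * pvF Ns k i) := by
    funext i s
    by_cases hk : i = k <;> simp [pvC, pvF, hk]
  rw [hfun, pv_B_foldr]
  by_cases hM : 1 ≤ M
  · rw [if_pos hM, PySem.List.pyRange_one_cons (by omega : (1:Int) < M + 1)]
    simp only [pvSum]
    have hc : (if (1 : Int) ≠ k then PySem.List.pyGetD a 0 0 else PySem.List.pyGetD a 0 0 - 1)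
        = pvC a k 1 := by
      by_cases hk : (1 : Int) = k <;> simp [pvC, hk]
    rw [hc]
    ring
  · rw [if_neg hM, PySem.List.pyRange_one_eq_nil (by omega : M + 1 ≤ 1 + 1),
      PySem.List.pyRange_one_eq_nil (by omega : M + 1 ≤ 1)]

-- ===== VERDICT (by name: the statement is the Claim_ definition above) =====
theorem Pos_R0_spec : Claim_equal_Pos_R0 := by
  intro a Ns M k _ _
  unfold Spec_Pos_R0 Pos_R0
  by_cases hM : 0 ≤ M
  · rw [pv_B_eq, pv_A_outer a Ns M k M.toNat 1 0 (by omega)]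
    ring
  · rw [pv_B_eq, PySem.List.pyRange_one_eq_nil (by omega : M + 1 ≤ 1)]
    simp [pvSum]
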